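-- pv_equiv track=rewrite | github.com/vanicat/advant-soluce-python | soluce23.py | explore_rec
-- ===== SOURCE A (Python) =====
-- from collections.abc import Generator, Sequence
--
-- dep = (
--     (1, 0),
--     (-1, 0),
--     (0, 1),
--     (0, -1)
-- )
--
-- def explore_rec(i:int, j:int, labyrinthe:list[str], seen:set[tuple[int, int]], step:int) -> Generator[int, None, None]:
--     pos = (i, j)
--     if pos in seen:
--         return
--     if i == len(labyrinthe) - 1:
--         yield step
--         return
--     seen.add(pos)
--     for di, dj in dep:
--         ni = i + di
--         nj = j + dj
--         match labyrinthe[ni][nj]: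
--             case ".":
--                 yield from explore_rec(ni, nj, labyrinthe, seen, step + 1)
--             case "^":
--                 yield from explore_rec(ni-1, nj, labyrinthe, seen, step + 2)
--             case ">":
--                 yield from explore_rec(ni, nj+1, labyrinthe, seen, step + 2)
--             case "v":
--                 yield from explore_rec(ni+1, nj, labyrinthe, seen, step + 2)
--             case "<":
--                 yield from explore_rec(ni, nj-1, labyrinthe, seen, step + 2)
--     seen.remove(pos)
-- ===== SOURCE B (Python) =====
-- # Iterative DFS with an explicit stack of (unmark, pos, step) frames instead of
-- # recursion; like A it mutates `seen` transiently (net unchanged once the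
-- # generator is fully consumed) and yields step counts in the same DFS order.
-- dep = (
--     (1, 0),
--     (-1, 0),
--     (0, 1),
--     (0, -1)
-- )
--
-- def explore_rec(i, j, labyrinthe, seen, step):
--     stack = [(False, (i, j), step)]
--     while stack:
--         unmark, pos, st = stack.pop()
--         if unmark:
--             seen.remove(pos)
--             continue
--         if pos in seen:
--             continue
--         ci, cj = pos
--         if ci == len(labyrinthe) - 1:
--             yield st
--             continue
--         seen.add(pos)
--         children = []
--         for di, dj in dep:
--             ni = ci + di
--             nj = cj + dj
--             c = labyrinthe[ni][nj]
--             if c == ".":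
--                 children.append((False, (ni, nj), st + 1))
--             elif c == "^":
--                 children.append((False, (ni - 1, nj), st + 2))
--             elif c == ">":
--                 children.append((False, (ni, nj + 1), st + 2))
--             elif c == "v":
--                 children.append((False, (ni + 1, nj), st + 2))
--             elif c == "<":
--                 children.append((False, (ni, nj - 1), st + 2))
--         stack.append((True, pos, 0))
--         stack.extend(reversed(children))
-- ===== Notes on version B (the rewrite author's own statement) =====
-- stated objective: alternative
-- what changed: The recursive generator is replaced by an iterative DFS over an explicit stack of (unmark, pos, step) frames: a visit frame performs A's checks, marks the position and pushes its matched neighbour frames plus an unmark frame, yielding the same step counts in the same order without Python recursion.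
import Mathlib
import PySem

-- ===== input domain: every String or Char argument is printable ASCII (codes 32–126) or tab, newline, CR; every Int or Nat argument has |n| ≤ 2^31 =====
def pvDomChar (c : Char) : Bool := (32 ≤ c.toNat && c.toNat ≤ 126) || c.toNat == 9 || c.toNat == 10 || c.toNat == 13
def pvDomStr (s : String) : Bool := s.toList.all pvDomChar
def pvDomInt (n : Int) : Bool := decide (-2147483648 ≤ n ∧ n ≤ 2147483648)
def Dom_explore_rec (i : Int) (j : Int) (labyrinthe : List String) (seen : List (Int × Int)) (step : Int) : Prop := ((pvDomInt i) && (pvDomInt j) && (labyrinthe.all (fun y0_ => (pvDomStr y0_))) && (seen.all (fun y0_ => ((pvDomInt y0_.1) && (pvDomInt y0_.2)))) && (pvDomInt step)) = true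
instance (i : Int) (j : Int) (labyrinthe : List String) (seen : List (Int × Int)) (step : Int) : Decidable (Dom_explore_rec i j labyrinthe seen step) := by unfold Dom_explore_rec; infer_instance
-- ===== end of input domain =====

-- B replaces A's recursive generator by an iterative DFS over an explicit stack of
-- (unmark, pos, step) frames, yielding the same steps in the same order.
-- Both versions mutate `seen` only transiently (net unchanged once fully consumed);
-- the equivalence proved here is about the returned (fully consumed) value.
-- Both ports carry a fuel argument as a totality device only; pvFuel exceeds the
-- maximal recursion depth on inputs satisfying Pre_explore_rec.

-- ===== PORT A =====
def pvDeps : List (Int × Int) := [(1, 0), (-1, 0), (0, 1), (0, -1)]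

-- labyrinthe[ni][nj] with Python index semantics (none = IndexError)
def pvCell (lab : List String) (ni nj : Int) : Option Char :=
  match PySem.List.pyGet? lab ni with
  | none => none
  | some row => PySem.List.pyGet? row.toList nj

-- fuel bound: exceeds the number of distinct positions any raise-free run can mark
def pvFuel (lab : List String) : Nat :=
  16 * ((lab.map (fun s => s.toList.length)).sum + lab.length + 2)

def exploreA : Nat → Int → Int → List String → PySem.Set (Int × Int) → Int → List Int
  | 0, _, _, _, _, _ => []
  | f + 1, i, j, lab, seen, step =>
    if (i, j) ∈ seen then []
    else if i = (lab.length : Int) - 1 then [step]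
    else
      let seen' := PySem.Set.add seen (i, j)
      let go : Int × Int → List Int := fun d =>
        match pvCell lab (i + d.1) (j + d.2) with
        | some '.' => exploreA f (i + d.1) (j + d.2) lab seen' (step + 1)
        | some '^' => exploreA f (i + d.1 - 1) (j + d.2) lab seen' (step + 2)
        | some '>' => exploreA f (i + d.1) (j + d.2 + 1) lab seen' (step + 2)
        | some 'v' => exploreA f (i + d.1 + 1) (j + d.2) lab seen' (step + 2)
        | some '<' => exploreA f (i + d.1) (j + d.2 - 1) lab seen' (step + 2)
        | _ => []
      go (1, 0) ++ go (-1, 0) ++ go (0, 1) ++ go (0, -1)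

def explore_rec (i : Int) (j : Int) (labyrinthe : List String) (seen : List (Int × Int)) (step : Int) : List Int :=
  exploreA (pvFuel labyrinthe) i j labyrinthe (PySem.Set.ofList seen) step

-- ===== PORT B =====
-- one matched neighbour frame (the body of Source B's inner `for di, dj in dep` loop)
def pvChild (lab : List String) (f : Nat) (ci cj st : Int) (d : Int × Int) :
    Option (Nat × Bool × (Int × Int) × Int) :=
  match pvCell lab (ci + d.1) (cj + d.2) with
  | some '.' => some (f, false, (ci + d.1, cj + d.2), st + 1)
  | some '^' => some (f, false, (ci + d.1 - 1, cj + d.2), st + 2)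
  | some '>' => some (f, false, (ci + d.1, cj + d.2 + 1), st + 2)
  | some 'v' => some (f, false, (ci + d.1 + 1, cj + d.2), st + 2)
  | some '<' => some (f, false, (ci + d.1, cj + d.2 - 1), st + 2)
  | _ => none

def pvWeight (fr : Nat × Bool × (Int × Int) × Int) : Nat :=
  if fr.2.1 then 1 else 5 ^ (fr.1 + 1)

theorem pvChild_weight (lab : List String) (f : Nat) (ci cj st : Int) (d : Int × Int)
    (fr : Nat × Bool × (Int × Int) × Int) (h : pvChild lab f ci cj st d = some fr) :
    pvWeight fr = 5 ^ (f + 1) := by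
  unfold pvChild at h
  split at h <;> first
  | (cases h; simp [pvWeight])
  | simp_all

theorem children_weight (lab : List String) (f : Nat) (ci cj st : Int) :
    ∀ ds : List (Int × Int),
      ((ds.filterMap (pvChild lab f ci cj st)).map pvWeight).sum ≤ ds.length * 5 ^ (f + 1)
  | [] => by simp
  | d :: ds => by
    have ih := children_weight lab f ci cj st ds
    cases h : pvChild lab f ci cj st d with
    | none =>
      simp only [List.filterMap_cons, h, List.length_cons, Nat.succ_mul]
      exact le_trans ih (Nat.le_add_right _ _)
    | some fr =>
      simp only [List.filterMap_cons, h, List.map_cons, List.sum_cons,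
        pvChild_weight lab f ci cj st d fr h, List.length_cons, Nat.succ_mul]
      omega

-- the `while stack:` loop of Source B; head of the list = top of the stack
def exploreB (lab : List String) :
    List (Nat × Bool × (Int × Int) × Int) → PySem.Set (Int × Int) → List Int
  | [], _ => []
  | (fuel, unmark, pos, st) :: rest, seen =>
    if unmark then exploreB lab rest (PySem.Set.discard seen pos)
    else
      match fuel with
      | 0 => exploreB lab rest seen  -- fuel exhaustion: totality scaffolding only, unreachable under Pre_
      | f + 1 =>
        if pos ∈ seen then exploreB lab rest seen
        else if pos.1 = (lab.length : Int) - 1 then st :: exploreB lab rest seen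
        else
          let seen' := PySem.Set.add seen pos
          let children := pvDeps.filterMap (pvChild lab f pos.1 pos.2 st)
          exploreB lab (children ++ (0, true, pos, 0) :: rest) seen'
  termination_by stack _ => (stack.map pvWeight).sum
  decreasing_by
  · simp_all [pvWeight]
  · simp_all [pvWeight]
  · simp_all [pvWeight]
  · simp_all [pvWeight]
  · rename_i hu _ _
    have hc := children_weight lab f pos.1 pos.2 st pvDeps
    simp only [pvDeps, List.length_cons, List.length_nil] at hc
    have hp : 0 < 5 ^ f := pow_pos (by norm_num) f
    rw [pow_succ] at hc
    simp only [List.map_append, List.sum_append, List.map_cons, List.sum_cons, pvWeight,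
      pvDeps]
    rw [if_neg hu]
    simp only [if_true]
    have h25 : 5 ^ (f.succ + 1) = 5 ^ f * 5 * 5 := by rw [pow_succ, pow_succ]
    rw [h25]
    omega

def explore_rec_alt (i : Int) (j : Int) (labyrinthe : List String) (seen : List (Int × Int)) (step : Int) : List Int :=
  exploreB labyrinthe [(pvFuel labyrinthe, false, (i, j), step)] (PySem.Set.ofList seen)

-- ===== PRECONDITION & SPEC =====
-- Pre_explore_rec holds EXACTLY when the Python A returns normally (otherwise A raises
-- IndexError on some labyrinthe[ni][nj] read): it excludes precisely the inputs from
-- which a cell with an out-of-range neighbour read is reachable from the start through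
-- cells not in `seen` and not on the bottom row.  It is stated as a plain graph
-- reachability closure over the grid (no step counts, no seen-backtracking, no DFS),
-- not a re-run of either port.

-- a call at p proceeds past its checks (not already seen, not on the bottom row)
def pvLive (lab : List String) (seenI : List (Int × Int)) (p : Int × Int) : Bool :=
  !(seenI.contains p) && !(p.1 == (lab.length : Int) - 1)

-- all four neighbour reads labyrinthe[p.1±1][p.2], labyrinthe[p.1][p.2±1] are in range
def pvReadsOk (lab : List String) (p : Int × Int) : Bool :=
  pvDeps.all (fun d => (pvCell lab (p.1 + d.1) (p.2 + d.2)).isSome)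

-- the positions a call at p recurses to (walls and failed reads give no successor)
def pvNexts (lab : List String) (p : Int × Int) : List (Int × Int) :=
  pvDeps.filterMap (fun d =>
    match pvCell lab (p.1 + d.1) (p.2 + d.2) with
    | some '.' => some (p.1 + d.1, p.2 + d.2)
    | some '^' => some (p.1 + d.1 - 1, p.2 + d.2)
    | some '>' => some (p.1 + d.1, p.2 + d.2 + 1)
    | some 'v' => some (p.1 + d.1 + 1, p.2 + d.2)
    | some '<' => some (p.1 + d.1, p.2 + d.2 - 1)
    | _ => none)

-- saturate the reachable-position set (iteration count pvFuel exceeds its final size)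
def pvReachAux (lab : List String) (seenI : List (Int × Int)) :
    Nat → List (Int × Int) → List (Int × Int)
  | 0, acc => acc
  | k + 1, acc =>
    let nxt := acc.foldl (fun a p =>
      if pvLive lab seenI p && pvReadsOk lab p then
        (pvNexts lab p).foldl (fun a q => if a.contains q then a else a ++ [q]) a
      else a) acc
    if nxt.length == acc.length then acc else pvReachAux lab seenI k nxt

-- true iff the Python A raises IndexError on this input
def pvRaisesIdx (i j : Int) (lab : List String) (seenI : List (Int × Int)) : Bool :=
  (pvReachAux lab seenI (pvFuel lab) [(i, j)]).any
    (fun p => pvLive lab seenI p && !pvReadsOk lab p)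

def Pre_explore_rec (i : Int) (j : Int) (labyrinthe : List String) (seen : List (Int × Int)) (step : Int) : Prop :=
  pvRaisesIdx i j labyrinthe seen = false
instance (i : Int) (j : Int) (labyrinthe : List String) (seen : List (Int × Int)) (step : Int) : Decidable (Pre_explore_rec i j labyrinthe seen step) := by unfold Pre_explore_rec; infer_instance

def pvWitness_explore_rec : Int × Int × List String × (List (Int × Int)) × Int :=
  (0, 1, ["#.#", "#.#", "###"], [], 0)

def Spec_explore_rec (i : Int) (j : Int) (labyrinthe : List String) (seen : List (Int × Int)) (step : Int) (out : List Int) : Prop := out = explore_rec_alt i j labyrinthe seen step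
instance (i : Int) (j : Int) (labyrinthe : List String) (seen : List (Int × Int)) (step : Int) (out : List Int) : Decidable (Spec_explore_rec i j labyrinthe seen step out) := by unfold Spec_explore_rec; infer_instance

-- ===== CLAIM (what is proved, stated in full; the proofs are below) =====
def Claim_equal_explore_rec : Prop := ∀ (i : Int) (j : Int) (labyrinthe : List String) (seen : List (Int × Int)) (step : Int), Dom_explore_rec i j labyrinthe seen step → Pre_explore_rec i j labyrinthe seen step → Spec_explore_rec i j labyrinthe seen step (explore_rec i j labyrinthe seen step)

-- ===== LEMMAS AND PROOFS =====

-- removing a freshly added element restores the set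
theorem discard_add_of_not_mem (s : PySem.Set (Int × Int)) (x : Int × Int) (h : x ∉ s) :
    PySem.Set.discard (PySem.Set.add s x) x = s := by
  unfold PySem.Set.discard PySem.Set.add
  simp [h]
  exact fun a b hm he => h (he ▸ hm)

-- one direction of A's loop body, routed through pvChild
theorem goA_eq_child (lab : List String) (f : Nat) (i j st : Int)
    (seen' : PySem.Set (Int × Int)) (di dj : Int) :
    (match pvCell lab (i + di) (j + dj) with
      | some '.' => exploreA f (i + di) (j + dj) lab seen' (st + 1)
      | some '^' => exploreA f (i + di - 1) (j + dj) lab seen' (st + 2)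
      | some '>' => exploreA f (i + di) (j + dj + 1) lab seen' (st + 2)
      | some 'v' => exploreA f (i + di + 1) (j + dj) lab seen' (st + 2)
      | some '<' => exploreA f (i + di) (j + dj - 1) lab seen' (st + 2)
      | _ => [])
    = (match pvChild lab f i j st (di, dj) with
       | some fr => exploreA fr.1 fr.2.2.1.1 fr.2.2.1.2 lab seen' fr.2.2.2
       | none => []) := by
  unfold pvChild
  split <;> simp_all

theorem pvChild_some (lab : List String) (f : Nat) (ci cj st : Int) (d : Int × Int)
    (fr : Nat × Bool × (Int × Int) × Int) (h : pvChild lab f ci cj st d = some fr) :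
    ∃ p s', fr = (f, false, p, s') := by
  unfold pvChild at h
  split at h <;> first
  | (cases h; exact ⟨_, _, rfl⟩)
  | simp_all

-- the stack lemma: a visit frame contributes exploreA's output, restoring seen for the rest
theorem B_visit (lab : List String) :
    ∀ (f : Nat) (i j st : Int) (rest : List (Nat × Bool × (Int × Int) × Int))
      (seen : PySem.Set (Int × Int)),
      exploreB lab ((f, false, (i, j), st) :: rest) seen
        = exploreA f i j lab seen st ++ exploreB lab rest seen := by
  intro f
  induction f with
  | zero => intro i j st rest seen; simp [exploreB, exploreA]
  | succ f ih =>
    intro i j st rest seen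
    by_cases hm : (i, j) ∈ seen
    · simp [exploreB, exploreA, hm]
    · by_cases ht : i = (lab.length : Int) - 1
      · subst ht; simp [exploreB, exploreA, hm]
      · have chain : ∀ (ds : List (Int × Int)) (rest' : List (Nat × Bool × (Int × Int) × Int))
            (seen0 : PySem.Set (Int × Int)),
            exploreB lab (ds.filterMap (pvChild lab f i j st) ++ rest') seen0
              = (ds.map (fun d =>
                  match pvChild lab f i j st d with
                  | some fr => exploreA fr.1 fr.2.2.1.1 fr.2.2.1.2 lab seen0 fr.2.2.2
                  | none => [])).flatten ++ exploreB lab rest' seen0 := by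
          intro ds
          induction ds with
          | nil => intro rest' seen0; simp
          | cons d ds ihd =>
            intro rest' seen0
            cases hc : pvChild lab f i j st d with
            | none => simp [hc, ihd]
            | some fr =>
              obtain ⟨p, s', rfl⟩ := pvChild_some lab f i j st d fr hc
              simp only [List.filterMap_cons, hc, List.cons_append, List.map_cons,
                List.flatten_cons]
              rw [ih p.1 p.2 s' _ seen0, ihd rest' seen0]
              simp [List.append_assoc]
        have hB : exploreB lab ((f + 1, false, (i, j), st) :: rest) seen
            = exploreB lab (pvDeps.filterMap (pvChild lab f i j st)
                ++ (0, true, (i, j), 0) :: rest) (PySem.Set.add seen (i, j)) := by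
          simp [exploreB, hm, ht]
        have hU : exploreB lab ((0, true, (i, j), 0) :: rest) (PySem.Set.add seen (i, j))
            = exploreB lab rest seen := by
          simp [exploreB, discard_add_of_not_mem seen (i, j) hm]
        have hA : exploreA (f + 1) i j lab seen st
            = (pvDeps.map (fun d =>
                match pvChild lab f i j st d with
                | some fr => exploreA fr.1 fr.2.2.1.1 fr.2.2.1.2 lab (PySem.Set.add seen (i, j)) fr.2.2.2
                | none => [])).flatten := by
          simp only [exploreA]
          rw [if_neg hm, if_neg ht]
          rw [goA_eq_child lab f i j st _ 1 0, goA_eq_child lab f i j st _ (-1) 0,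
            goA_eq_child lab f i j st _ 0 1, goA_eq_child lab f i j st _ 0 (-1)]
          simp [pvDeps]
        rw [hB, chain pvDeps ((0, true, (i, j), 0) :: rest) (PySem.Set.add seen (i, j)), hU, hA]

-- ===== VERDICT (by name: the statement is the Claim_ definition above) =====
theorem explore_rec_spec : Claim_equal_explore_rec := by
  intro i j lab seen step _ _
  unfold Spec_explore_rec explore_rec explore_rec_alt
  rw [B_visit]
  simp [exploreB]
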